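-- pv_equiv track=rewrite | github.com/ihsokanuf/matching-selection | matching.py | merge_dicts_with_final_result
-- ===== SOURCE A (Python) =====
-- def merge_dicts_with_final_result(
--     target_org, target_params, final_result, final_result2
-- ):
--     """Merge dictionaries with final matching results.
--
--     Args:
--         target_org (dict): Original target data.
--         target_params (dict): Target parameters.
--         final_result (dict): Final matching results.
--         final_result2 (dict): Alternate final matching results.
--
--     Returns:
--         dict: Merged data.
--     """
--     merged = {}
--     reversed_final_result = {
--         id: role for role, ids in final_result.items() for id in ids
--     }
--     reversed_final_result2 = {
--         id: role for role, ids in final_result2.items() for id in ids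
--     }
--
--     for target_id, target_data in target_org.items():
--         if target_id in target_params:
--             merged_data = {**target_data, **target_params[target_id]}
--             merged_data["Elected"] = reversed_final_result.get(target_id, "")
--             merged_data["Alternate"] = reversed_final_result2.get(target_id, "")
--             merged[target_id] = merged_data
--
--     return merged
-- ===== SOURCE B (Python) =====
-- def merge_dicts_with_final_result(
--     target_org, target_params, final_result, final_result2
-- ):
--     """Same merge without reversed lookup dicts: build merged with empty
--     roles first, then write each role straight into merged (later roles
--     overwrite earlier ones, preserving last-match semantics)."""
--     merged = {}
--     for target_id, target_data in target_org.items():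
--         params = target_params.get(target_id)
--         if params is not None:
--             merged[target_id] = {
--                 **target_data, **params, "Elected": "", "Alternate": ""
--             }
--     for field, results in (("Elected", final_result), ("Alternate", final_result2)):
--         for role, ids in results.items():
--             for i in ids:
--                 if i in merged:
--                     merged[i][field] = role
--     return merged
-- ===== Notes on version B (the rewrite author's own statement) =====
-- stated objective: alternative
-- what changed: Drops the two reversed id->role dictionaries: merged entries are created with empty role fields and the roles are then written directly into the merged entries by one pass over each result dict (later roles overwrite, keeping last-match semantics).
import Mathlib
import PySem

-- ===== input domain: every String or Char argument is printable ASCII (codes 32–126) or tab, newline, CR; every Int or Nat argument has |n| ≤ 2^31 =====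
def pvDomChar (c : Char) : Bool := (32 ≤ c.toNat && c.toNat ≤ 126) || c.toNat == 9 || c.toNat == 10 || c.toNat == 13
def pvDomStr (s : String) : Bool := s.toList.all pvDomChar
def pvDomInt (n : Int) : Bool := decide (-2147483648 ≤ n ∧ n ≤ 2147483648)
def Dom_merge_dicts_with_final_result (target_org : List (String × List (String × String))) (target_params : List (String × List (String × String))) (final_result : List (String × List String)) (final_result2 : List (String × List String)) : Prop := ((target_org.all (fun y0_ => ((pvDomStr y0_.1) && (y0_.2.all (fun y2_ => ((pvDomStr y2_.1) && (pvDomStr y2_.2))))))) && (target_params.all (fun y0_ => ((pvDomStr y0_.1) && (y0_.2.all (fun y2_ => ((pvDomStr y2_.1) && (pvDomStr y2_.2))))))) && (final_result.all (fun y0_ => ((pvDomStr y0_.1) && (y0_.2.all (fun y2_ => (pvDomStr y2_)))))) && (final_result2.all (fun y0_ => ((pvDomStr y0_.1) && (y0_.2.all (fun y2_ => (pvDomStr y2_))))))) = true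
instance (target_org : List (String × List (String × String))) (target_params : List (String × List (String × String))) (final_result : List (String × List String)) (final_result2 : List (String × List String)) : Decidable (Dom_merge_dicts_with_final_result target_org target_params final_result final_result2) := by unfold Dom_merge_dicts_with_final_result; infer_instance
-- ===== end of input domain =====

-- ===== PORT A =====
def merge_dicts_with_final_result (target_org : List (String × List (String × String))) (target_params : List (String × List (String × String))) (final_result : List (String × List String)) (final_result2 : List (String × List String)) : List (String × List (String × String)) :=
  let tpd := PySem.Dict.ofList target_params
  let reversed_final_result := (PySem.Dict.ofList final_result).items.foldl
    (fun d p => p.2.foldl (fun d i => d.insert i p.1) d) PySem.Dict.empty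
  let reversed_final_result2 := (PySem.Dict.ofList final_result2).items.foldl
    (fun d p => p.2.foldl (fun d i => d.insert i p.1) d) PySem.Dict.empty
  let merged := (PySem.Dict.ofList target_org).items.foldl
    (fun m p =>
      if tpd.contains p.1 then
        let md := (PySem.Dict.ofList p.2).update (tpd.getD p.1 [])
        let md := md.insert "Elected" (reversed_final_result.getD p.1 "")
        let md := md.insert "Alternate" (reversed_final_result2.getD p.1 "")
        m.insert p.1 md.items
      else m) PySem.Dict.empty
  merged.items

-- ===== PORT B =====
-- write `role` into merged[i][field] for every id i of every (role, ids) that is already in merged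
def pvAssignRoles (field : String) (results : List (String × List String)) (m : PySem.Dict String (PySem.Dict String String)) : PySem.Dict String (PySem.Dict String String) :=
  (PySem.Dict.ofList results).items.foldl
    (fun m p => p.2.foldl
      (fun m i => if m.contains i then m.insert i ((m.getD i PySem.Dict.empty).insert field p.1) else m) m) m

def merge_dicts_with_final_result_alt (target_org : List (String × List (String × String))) (target_params : List (String × List (String × String))) (final_result : List (String × List String)) (final_result2 : List (String × List String)) : List (String × List (String × String)) :=
  let tpd := PySem.Dict.ofList target_params
  let base := (PySem.Dict.ofList target_org).items.foldl
    (fun m p =>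
      match tpd.get? p.1 with
      | some params =>
          m.insert p.1 ((((PySem.Dict.ofList p.2).update params).insert "Elected" "").insert "Alternate" "")
      | none => m) PySem.Dict.empty
  (([("Elected", final_result), ("Alternate", final_result2)].foldl
      (fun m q => pvAssignRoles q.1 q.2 m) base).items).map (fun q => (q.1, q.2.items))

-- ===== PRECONDITION & SPEC =====
def Spec_merge_dicts_with_final_result (target_org : List (String × List (String × String))) (target_params : List (String × List (String × String))) (final_result : List (String × List String)) (final_result2 : List (String × List String)) (out : List (String × List (String × String))) : Prop := out = merge_dicts_with_final_result_alt target_org target_params final_result final_result2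
instance (target_org : List (String × List (String × String))) (target_params : List (String × List (String × String))) (final_result : List (String × List String)) (final_result2 : List (String × List String)) (out : List (String × List (String × String))) : Decidable (Spec_merge_dicts_with_final_result target_org target_params final_result final_result2 out) := by unfold Spec_merge_dicts_with_final_result; infer_instance

-- ===== CLAIM (what is proved, stated in full; the proofs are below) =====
def Claim_equal_merge_dicts_with_final_result : Prop := ∀ (target_org : List (String × List (String × String))) (target_params : List (String × List (String × String))) (final_result : List (String × List String)) (final_result2 : List (String × List String)), Dom_merge_dicts_with_final_result target_org target_params final_result final_result2 → Spec_merge_dicts_with_final_result target_org target_params final_result final_result2 (merge_dicts_with_final_result target_org target_params final_result final_result2)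

-- ===== LEMMAS AND PROOFS =====
-- B drops the reversed id→role dictionaries and writes roles straight into the merged entries (objective: alternative); return-value equivalence only.

-- the (id, role) occurrences of a result dict, in write order
def pvOccs (res : List (String × List String)) : List (String × String) :=
  ((PySem.Dict.ofList res).items).flatMap (fun p => p.2.map (fun i => (i, p.1)))

-- one write of B's role pass
def pvStep (f : String) (m : PySem.Dict String (PySem.Dict String String)) (q : String × String) : PySem.Dict String (PySem.Dict String String) :=
  if m.contains q.1 then m.insert q.1 ((m.getD q.1 PySem.Dict.empty).insert f q.2) else m

-- the cumulative effect of a role pass on the entry of key tid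
def pvPhi (f : String) (occs : List (String × String)) (tid : String) (d : PySem.Dict String String) : PySem.Dict String String :=
  (occs.filter (fun r => r.1 == tid)).foldl (fun d r => d.insert f r.2) d

-- canonical shape of a merged entry
def pvC (md : PySem.Dict String String) (x y : String) : PySem.Dict String String :=
  (md.insert "Elected" x).insert "Alternate" y

-- foldl with pointwise-equal step functions
theorem pvFoldlExt {α β : Type} (f g : α → β → α) (h : ∀ a b, f a b = g a b) :
    ∀ (l : List β) (i : α), l.foldl f i = l.foldl g i := by
  intro l
  induction l with
  | nil => intro i; rfl
  | cons b l ih => intro i; simp only [List.foldl_cons, h, ih]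

-- a fold of inner folds is a fold over the flatMap
theorem pvFoldlFlatMap {α β γ : Type} (g : β → List γ) (F : α → γ → α) :
    ∀ (l : List β) (a : α), (l.flatMap g).foldl F a = l.foldl (fun a p => (g p).foldl F a) a := by
  intro l
  induction l with
  | nil => intro a; rfl
  | cons b l ih => intro a; simp only [List.flatMap_cons, List.foldl_append, List.foldl_cons, ih]

-- two overwrites at distinct keys commute when the second key is already present
theorem pvInsertComm {ν : Type} (d : PySem.Dict String ν) (k k' : String) (v w : ν)
    (hk : d.contains k = true) (hne : k ≠ k') :
    (d.insert k' w).insert k v = (d.insert k v).insert k' w := by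
  apply PySem.Dict.ext
  have hb : (k' == k) = false := by simpa using Ne.symm hne
  have hb' : (k == k') = false := by simpa using hne
  have hck : (d.insert k' w).contains k = true := by
    rw [PySem.Dict.contains_insert, hk]; simp
  by_cases hk' : d.contains k' = true
  · have hck' : (d.insert k v).contains k' = true := by
      rw [PySem.Dict.contains_insert, hk']; simp
    rw [PySem.Dict.items_insert_of_contains _ v hck, PySem.Dict.items_insert_of_contains _ w hk',
        PySem.Dict.items_insert_of_contains _ w hck', PySem.Dict.items_insert_of_contains _ v hk,
        List.map_map, List.map_map]
    apply List.map_congr_left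
    intro p _
    simp only [Function.comp]
    by_cases h1 : p.1 = k <;> by_cases h2 : p.1 = k'
    · exact absurd (h1.symm.trans h2) hne
    · simp [h1, hb']
    · simp [h2, hb]
    · simp [h1, h2]
  · have hk'f : d.contains k' = false := by simpa using hk'
    have hck'2 : (d.insert k v).contains k' = false := by
      rw [PySem.Dict.contains_insert, hk'f, hb]; rfl
    rw [PySem.Dict.items_insert_of_contains _ v hck,
        PySem.Dict.items_insert_of_not_contains _ w hck'2,
        PySem.Dict.items_insert_of_not_contains _ w hk'f,
        PySem.Dict.items_insert_of_contains _ v hk,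
        List.map_append]
    simp only [List.map_cons, List.map_nil, hb, Bool.false_eq_true, if_false]

-- overwriting "Elected" / "Alternate" in a canonical entry
theorem pvC_insert_E (md : PySem.Dict String String) (x y v : String) :
    (pvC md x y).insert "Elected" v = pvC md v y := by
  unfold pvC
  rw [pvInsertComm (md.insert "Elected" x) "Elected" "Alternate" v y
        (PySem.Dict.contains_insert_self _ _ _) (by decide),
      PySem.Dict.insert_insert_self]

theorem pvC_insert_A (md : PySem.Dict String String) (x y v : String) :
    (pvC md x y).insert "Alternate" v = pvC md x v := by
  unfold pvC; rw [PySem.Dict.insert_insert_self]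

-- a run of "Elected" overwrites collapses to the last one
theorem pvFoldE (l : List (String × String)) : ∀ (md : PySem.Dict String String) (x y : String),
    l.foldl (fun d r => d.insert "Elected" r.2) (pvC md x y) =
      pvC md (l.foldl (fun _ r => r.2) x) y := by
  induction l with
  | nil => intro md x y; rfl
  | cons r l ih => intro md x y; simp only [List.foldl_cons, pvC_insert_E, ih]

theorem pvFoldA (l : List (String × String)) : ∀ (md : PySem.Dict String String) (x y : String),
    l.foldl (fun d r => d.insert "Alternate" r.2) (pvC md x y) =
      pvC md x (l.foldl (fun _ r => r.2) y) := by
  induction l with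
  | nil => intro md x y; rfl
  | cons r l ih => intro md x y; simp only [List.foldl_cons, pvC_insert_A, ih]

-- lookup in the reversed dict = last matching occurrence
theorem pvGetD_occs (occs : List (String × String)) : ∀ (d : PySem.Dict String String) (tid : String),
    (occs.foldl (fun d q => d.insert q.1 q.2) d).getD tid "" =
      (occs.filter (fun r => r.1 == tid)).foldl (fun _ r => r.2) (d.getD tid "") := by
  induction occs with
  | nil => intro d tid; rfl
  | cons q occs ih =>
      intro d tid
      simp only [List.foldl_cons, List.filter_cons, ih, PySem.Dict.getD_insert]
      by_cases h : q.1 = tid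
      · simp [h]
      · have h2 : ¬ tid = q.1 := fun hh => h hh.symm
        simp [h, h2]

-- the inner role-writing loop over ids, flattened
theorem pvAssignRoles_eq (f : String) (res : List (String × List String)) (m : PySem.Dict String (PySem.Dict String String)) :
    pvAssignRoles f res m = (pvOccs res).foldl (pvStep f) m := by
  unfold pvAssignRoles pvOccs
  rw [pvFoldlFlatMap]
  apply pvFoldlExt
  intro m p
  rw [List.foldl_map]
  rfl

-- A's reversed-dict build, flattened the same way
theorem pvRev_eq (res : List (String × List String)) :
    (PySem.Dict.ofList res).items.foldl (fun d p => p.2.foldl (fun d i => d.insert i p.1) d) PySem.Dict.empty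
      = (pvOccs res).foldl (fun d q => d.insert q.1 q.2) PySem.Dict.empty := by
  unfold pvOccs
  rw [pvFoldlFlatMap]
  apply pvFoldlExt
  intro d p
  rw [List.foldl_map]

-- a role pass transforms every entry by pvPhi and nothing else
theorem pvPassItems (f : String) (occs : List (String × String)) :
    ∀ (m : PySem.Dict String (PySem.Dict String String)), m.keys.Nodup →
      (occs.foldl (pvStep f) m).items = m.items.map (fun q => (q.1, pvPhi f occs q.1 q.2)) := by
  induction occs with
  | nil =>
      intro m _
      simp [pvPhi]
  | cons q occs ih =>
      intro m hnd
      simp only [List.foldl_cons, pvStep]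
      by_cases hc : m.contains q.1 = true
      · simp only [hc, if_true]
        have hkeys : (m.insert q.1 ((m.getD q.1 PySem.Dict.empty).insert f q.2)).keys = m.keys :=
          PySem.Dict.keys_insert_of_contains _ _ hc
        have hnd' : (m.insert q.1 ((m.getD q.1 PySem.Dict.empty).insert f q.2)).keys.Nodup := by
          rw [hkeys]; exact hnd
        rw [ih _ hnd', PySem.Dict.items_insert_of_contains _ _ hc, List.map_map]
        apply List.map_congr_left
        intro p hp
        simp only [Function.comp]
        by_cases h1 : p.1 = q.1
        · have hget : m.getD q.1 PySem.Dict.empty = p.2 := by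
            rw [← h1]
            exact PySem.Dict.getD_of_mem_items _ hp hnd _
          simp only [h1, beq_self_eq_true, if_true, pvPhi, List.filter_cons, hget]
          simp
        · have hb : (p.1 == q.1) = false := by simpa using h1
          simp only [hb, pvPhi, List.filter_cons]
          have hb2 : (q.1 == p.1) = false := by simp; exact fun h => h1 h.symm
          simp [hb2]
      · have hcf : m.contains q.1 = false := by simpa using hc
        simp only [hcf, Bool.false_eq_true, if_false]
        rw [ih _ hnd]
        apply List.map_congr_left
        intro p hp
        have hmem : p.1 ∈ m.keys := PySem.Dict.mem_keys_of_mem_items m hp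
        have hb2 : (q.1 == p.1) = false := by
          simp only [beq_eq_false_iff_ne, ne_eq]
          intro h
          rw [PySem.Dict.contains_eq_decide_mem_keys] at hcf
          simp [h, hmem] at hcf
        simp only [pvPhi, List.filter_cons, hb2]
        simp

-- keys of B's base stay duplicate-free
theorem pvBaseNodup (tp : List (String × List (String × String)))
    (T : List (String × List (String × String))) :
    ∀ (m : PySem.Dict String (PySem.Dict String String)), m.keys.Nodup →
      (T.foldl (fun m p =>
        match (PySem.Dict.ofList tp).get? p.1 with
        | some params => m.insert p.1 ((((PySem.Dict.ofList p.2).update params).insert "Elected" "").insert "Alternate" "")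
        | none => m) m).keys.Nodup := by
  induction T with
  | nil => intro m h; exact h
  | cons p T ih =>
      intro m h
      simp only [List.foldl_cons]
      rcases hg : (PySem.Dict.ofList tp).get? p.1 with _ | params
      · exact ih m h
      · exact ih _ (PySem.Dict.nodup_keys_insert _ _ _ h)

-- two same-skeleton folds whose inserted values differ by a key-indexed map G
theorem pvFoldMapVal {α β σ : Type} (G : String → α → β) (c : σ → Bool) (key : σ → String) (f : σ → α) :
    ∀ (T : List σ) (m1 : PySem.Dict String α) (m2 : PySem.Dict String β),
      m2.items = m1.items.map (fun q => (q.1, G q.1 q.2)) →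
      (T.foldl (fun m p => if c p then m.insert (key p) (G (key p) (f p)) else m) m2).items
        = (T.foldl (fun m p => if c p then m.insert (key p) (f p) else m) m1).items.map
            (fun q => (q.1, G q.1 q.2)) := by
  intro T
  induction T with
  | nil => intro m1 m2 h; exact h
  | cons p T ih =>
      intro m1 m2 h
      simp only [List.foldl_cons]
      by_cases hcp : c p = true
      · simp only [hcp, if_true]
        apply ih
        have hkeys : m2.keys = m1.keys := by
          show m2.items.map Prod.fst = m1.items.map Prod.fst
          rw [h, List.map_map]
          rfl
        by_cases hk : m1.contains (key p) = true
        · have hk2 : m2.contains (key p) = true := by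
            rw [PySem.Dict.contains_eq_decide_mem_keys, hkeys,
              ← PySem.Dict.contains_eq_decide_mem_keys]
            exact hk
          rw [PySem.Dict.items_insert_of_contains _ _ hk, PySem.Dict.items_insert_of_contains _ _ hk2, h,
            List.map_map, List.map_map]
          apply List.map_congr_left
          intro r _
          simp only [Function.comp]
          by_cases h1 : r.1 = key p <;> simp [h1]
        · have hkf : m1.contains (key p) = false := by simpa using hk
          have hk2 : m2.contains (key p) = false := by
            rw [PySem.Dict.contains_eq_decide_mem_keys, hkeys,
              ← PySem.Dict.contains_eq_decide_mem_keys]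
            exact hkf
          rw [PySem.Dict.items_insert_of_not_contains _ _ hkf,
            PySem.Dict.items_insert_of_not_contains _ _ hk2, h, List.map_append]
          rfl
      · simp only [hcp, Bool.false_eq_true, if_false]
        exact ih m1 m2 h

-- ===== VERDICT (by name: the statement is the Claim_ definition above) =====
theorem merge_dicts_with_final_result_spec : Claim_equal_merge_dicts_with_final_result := by
  intro torg tp fr fr2 _
  show merge_dicts_with_final_result torg tp fr fr2 = merge_dicts_with_final_result_alt torg tp fr fr2
  unfold merge_dicts_with_final_result merge_dicts_with_final_result_alt
  simp only [List.foldl_cons, List.foldl_nil]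
  rw [pvRev_eq fr, pvRev_eq fr2, pvAssignRoles_eq, pvAssignRoles_eq]
  -- name the pieces
  set tpd := PySem.Dict.ofList tp with htpd
  -- the entry-wise transformation B applies to its base entries
  have hG : ∀ (tid : String) (md : PySem.Dict String String),
      pvPhi "Alternate" (pvOccs fr2) tid (pvPhi "Elected" (pvOccs fr) tid (pvC md "" ""))
        = pvC md (((pvOccs fr).foldl (fun d q => d.insert q.1 q.2) PySem.Dict.empty).getD tid "")
                 (((pvOccs fr2).foldl (fun d q => d.insert q.1 q.2) PySem.Dict.empty).getD tid "") := by
    intro tid md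
    rw [pvGetD_occs, pvGetD_occs]
    unfold pvPhi
    rw [pvFoldE, pvFoldA]
    rfl
  -- rewrite B's base fold into guarded-if form
  have hbase : ∀ (m : PySem.Dict String (PySem.Dict String String)),
      ((PySem.Dict.ofList torg).items.foldl (fun m p =>
        match tpd.get? p.1 with
        | some params => m.insert p.1 ((((PySem.Dict.ofList p.2).update params).insert "Elected" "").insert "Alternate" "")
        | none => m) m)
      = ((PySem.Dict.ofList torg).items.foldl (fun m p =>
          if tpd.contains p.1 then
            m.insert p.1 (pvC ((PySem.Dict.ofList p.2).update (tpd.getD p.1 [])) "" "")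
          else m) m) := by
    intro m
    apply pvFoldlExt
    intro m p
    rcases hg : tpd.get? p.1 with _ | params
    · simp [PySem.Dict.contains_eq_isSome_get?, hg]
    · have hc : tpd.contains p.1 = true := by rw [PySem.Dict.contains_eq_isSome_get?, hg]; rfl
      have hgd : tpd.getD p.1 [] = params := by rw [PySem.Dict.getD_eq_get?_getD, hg]; rfl
      simp only [hc, if_true, hgd, pvC]
  rw [hbase]
  set G : String → PySem.Dict String String → List (String × String) :=
    fun tid d => (pvPhi "Alternate" (pvOccs fr2) tid (pvPhi "Elected" (pvOccs fr) tid d)).items with hGdef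
  -- A's fold, re-expressed through G applied to B's base values
  have hA : ((PySem.Dict.ofList torg).items.foldl (fun m p =>
      if tpd.contains p.1 then
        m.insert p.1
          (((((PySem.Dict.ofList p.2).update (tpd.getD p.1 [])).insert "Elected"
              (((pvOccs fr).foldl (fun d q => d.insert q.1 q.2) PySem.Dict.empty).getD p.1 "")).insert "Alternate"
              (((pvOccs fr2).foldl (fun d q => d.insert q.1 q.2) PySem.Dict.empty).getD p.1 "")).items)
      else m) PySem.Dict.empty)
    = ((PySem.Dict.ofList torg).items.foldl (fun m p =>
        if tpd.contains p.1 then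
          m.insert p.1 (G p.1 (pvC ((PySem.Dict.ofList p.2).update (tpd.getD p.1 [])) "" ""))
        else m) PySem.Dict.empty) := by
    apply pvFoldlExt
    intro m p
    by_cases hc : tpd.contains p.1 = true
    · simp only [hc, if_true, hGdef, hG]
      rfl
    · simp [hc]
  rw [hA]
  -- the two base-shaped folds (values f p vs G (key p) (f p)) have related items
  rw [pvFoldMapVal G (fun p => tpd.contains p.1) (fun p => p.1)
        (fun p => pvC ((PySem.Dict.ofList p.2).update (tpd.getD p.1 [])) "" "")
        (PySem.Dict.ofList torg).items PySem.Dict.empty PySem.Dict.empty rfl]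
  -- and B's two passes apply exactly G entry-wise
  have hnd : ((PySem.Dict.ofList torg).items.foldl (fun m p =>
      if tpd.contains p.1 then
        m.insert p.1 (pvC ((PySem.Dict.ofList p.2).update (tpd.getD p.1 [])) "" "")
      else m) PySem.Dict.empty).keys.Nodup := by
    rw [← hbase]
    exact pvBaseNodup tp _ PySem.Dict.empty PySem.Dict.nodup_keys_empty
  set base := ((PySem.Dict.ofList torg).items.foldl (fun m p =>
      if tpd.contains p.1 then
        m.insert p.1 (pvC ((PySem.Dict.ofList p.2).update (tpd.getD p.1 [])) "" "")
      else m) PySem.Dict.empty) with hbdef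
  have h1 : ((pvOccs fr).foldl (pvStep "Elected") base).items
      = base.items.map (fun q => (q.1, pvPhi "Elected" (pvOccs fr) q.1 q.2)) :=
    pvPassItems _ _ base hnd
  have hnd1 : ((pvOccs fr).foldl (pvStep "Elected") base).keys.Nodup := by
    show (((pvOccs fr).foldl (pvStep "Elected") base).items.map Prod.fst).Nodup
    rw [h1, List.map_map]
    exact hnd
  have h2 : ((pvOccs fr2).foldl (pvStep "Alternate") ((pvOccs fr).foldl (pvStep "Elected") base)).items
      = ((pvOccs fr).foldl (pvStep "Elected") base).items.map
          (fun q => (q.1, pvPhi "Alternate" (pvOccs fr2) q.1 q.2)) :=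
    pvPassItems _ _ _ hnd1
  rw [h2, h1, List.map_map, List.map_map]
  rfl
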